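-- pv_equiv track=rewrite | github.com/ouzhantrk98/8-Vezir-Problemi | eight_queen.py | satrancTahtasindaCakismaSayisiniBul
-- ===== SOURCE A (Python) =====
-- import copy
--
-- def cakismaSayisi(o_anki_satranc_tahtasi):
--
--     konum_listesi = [0]*8 #8 tane vezir var çünkü
--
--     cakisma_sayisi = 0
--
--     say = len(konum_listesi)
--
--
--     #vezilerin konumlarını bulalım
--
--     for i in range(len(o_anki_satranc_tahtasi)):
--
--         for j in range(len(o_anki_satranc_tahtasi[i])):
--
--             if(o_anki_satranc_tahtasi[i][j] == 1):
--
--                 konum_listesi[i] = j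
--
--
--     while say>1:
--
--         for j in range(1,say):
--
--             if((konum_listesi[0] - j == konum_listesi[j]) or (konum_listesi[0] == konum_listesi[j]) or (konum_listesi[0] + j) == konum_listesi[j]):
--
--                 cakisma_sayisi += 1
--
--         konum_listesi.pop(0)
--         say-=1
--
--     return cakisma_sayisi
--
-- def satrancTahtasindaCakismaSayisiniBul(array):
--
--     rows,cols = 8,7
--     array_cakisma = [[0 for x in range(cols)] for y in range(rows)]
--
--     arrayCopy = copy.deepcopy(array)
--
--     #Vezir yalnızca satır bazında ve üst ve alt çaprazlar bazında çakışma yaşayabilir.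
--     #bunun için her veziri sütun boyu her kareye hareket ettirip
--     #Her konumda oluşan çakışma sayısını fonksiyon ile bulduruyoruz.
--     for i in range(len(arrayCopy)):
--
--         for j in range(len(arrayCopy[i])):
--
--             if(arrayCopy[i][j] == 1):
--
--                 arrayCopy[i][j] = 0
--
--                 for k in range(j):
--
--                     arrayCopy[i][k] = 1
--                     array_cakisma[i][k] = cakismaSayisi(arrayCopy)
--                     arrayCopy[i][k] = 0
--
--                 for m in range(j+1,len(arrayCopy)):
--
--                     arrayCopy[i][m] = 1
--                     array_cakisma[i][m-1] = cakismaSayisi(arrayCopy)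
--                     arrayCopy[i][m] = 0
--
--                 arrayCopy[i][j] = 1
--
--     return array_cakisma
-- ===== SOURCE B (Python) =====
-- def satrancTahtasindaCakismaSayisiniBul(array):
--     # Conflict table without deepcopy/board mutation: extract queen columns once,
--     # vary pos[i] per trial and count conflicting pairs of positions directly.
--     result = [[0] * 7 for _ in range(8)]
--     pos = [0] * 8
--     queens = []  # (row, col) of each queen, row-major
--     for i, row in enumerate(array):
--         for j, v in enumerate(row):
--             if v == 1:
--                 pos[i] = j
--                 queens.append((i, j))
--     n = len(array)
--     for (i, j) in queens:
--         for t in list(range(j)) + list(range(j + 1, n)):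
--             pos[i] = t
--             c = 0
--             for p in range(8):
--                 for q in range(p + 1, 8):
--                     d = q - p
--                     if pos[p] == pos[q] or pos[p] - d == pos[q] or pos[p] + d == pos[q]:
--                         c += 1
--             result[i][t if t < j else t - 1] = c
--         pos[i] = j
--     return result
-- ===== Notes on version B (the rewrite author's own statement) =====
-- stated objective: simpler
-- what changed: B drops A's deepcopy, in-place board mutation and per-trial re-extraction of all queen positions: it extracts the queen positions and the queen list in one pass, then for each trial square just overwrites one entry of the position array and counts conflicting pairs with a direct i<j double loop.
import Mathlib
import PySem

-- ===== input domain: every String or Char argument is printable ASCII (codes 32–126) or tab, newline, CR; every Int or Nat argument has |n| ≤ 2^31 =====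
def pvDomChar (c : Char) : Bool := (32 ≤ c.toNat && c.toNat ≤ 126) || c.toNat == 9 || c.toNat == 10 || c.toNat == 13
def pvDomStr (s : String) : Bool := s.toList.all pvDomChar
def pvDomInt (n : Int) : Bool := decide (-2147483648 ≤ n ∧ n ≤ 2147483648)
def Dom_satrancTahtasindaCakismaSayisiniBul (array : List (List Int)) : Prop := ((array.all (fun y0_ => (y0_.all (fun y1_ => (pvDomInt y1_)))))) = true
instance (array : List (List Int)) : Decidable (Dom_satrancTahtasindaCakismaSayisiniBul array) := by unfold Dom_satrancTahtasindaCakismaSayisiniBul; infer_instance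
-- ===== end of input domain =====

-- B replaces A's deepcopy/board-mutation/per-trial re-extraction with a single extraction of
-- queen positions and a direct pair count per trial (objective: simpler & faster, same values).

-- ===== PORT A =====
-- arrayCopy[i][j] = v  (indices in range on every input Pre_ admits)
def pvSet2 (g : List (List Int)) (i j : Nat) (v : Int) : List (List Int) :=
  g.set i ((g.getD i []).set j v)

-- the konum_listesi extraction loop of cakismaSayisi (konum_listesi[i] = j on each 1-cell)
def pvRowStep (kl : List Int) (i : Nat) (row : List Int) : List Int :=
  (List.range row.length).foldl (fun kl2 j => if row.getD j 0 == 1 then kl2.set i (Int.ofNat j) else kl2) kl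

def pvKonum (g : List (List Int)) : List Int :=
  (List.range g.length).foldl (fun kl i => pvRowStep kl i (g.getD i [])) (List.replicate 8 (0 : Int))

-- the inner `for j in range(1, say)` pass: head konum_listesi[0] = x against the tail
def pvCountHead (x : Int) (rest : List Int) : Int :=
  (List.range rest.length).foldl (fun c j' =>
    if (x - Int.ofNat (j' + 1) == rest.getD j' 0) || (x == rest.getD j' 0) ||
       (x + Int.ofNat (j' + 1) == rest.getD j' 0) then c + 1 else c) 0

-- `while say > 1: …; konum_listesi.pop(0); say -= 1`
def pvCakWhile : List Int → Int → Int
  | [], c => c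
  | [_], c => c
  | x :: y :: rest, c => pvCakWhile (y :: rest) (c + pvCountHead x (y :: rest))

def cakismaSayisi (g : List (List Int)) : Int :=
  pvCakWhile (pvKonum g) 0

-- range(j+1, len(arrayCopy)): len(arrayCopy) is the row count, which mutation never changes
def satrancTahtasindaCakismaSayisiniBul (array : List (List Int)) : List (List Int) :=
  let cak0 := List.replicate 8 (List.replicate 7 (0 : Int))
  let st := (List.range array.length).foldl (fun (st : List (List Int) × List (List Int)) i =>
    (List.range ((st.1.getD i []).length)).foldl (fun (st : List (List Int) × List (List Int)) j =>
      if (st.1.getD i []).getD j 0 == 1 then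
        let g := pvSet2 st.1 i j 0
        let st2 := (List.range j).foldl (fun (st : List (List Int) × List (List Int)) k =>
          let g := pvSet2 st.1 i k 1
          let cak := st.2.set i ((st.2.getD i []).set k (cakismaSayisi g))
          (pvSet2 g i k 0, cak)) (g, st.2)
        let st3 := (List.range' (j+1) (array.length - (j+1))).foldl
          (fun (st : List (List Int) × List (List Int)) m =>
          let g := pvSet2 st.1 i m 1
          let cak := st.2.set i ((st.2.getD i []).set (m-1) (cakismaSayisi g))
          (pvSet2 g i m 0, cak)) st2
        (pvSet2 st3.1 i j 1, st3.2)
      else st) st) (array, cak0)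
  st.2

-- ===== PORT B =====
def pvPairCount (pos : List Int) : Int :=
  (List.range 8).foldl (fun c p =>
    (List.range' (p+1) (8 - (p+1))).foldl (fun c q =>
      if (pos.getD p 0 - (Int.ofNat q - Int.ofNat p) == pos.getD q 0) ||
         (pos.getD p 0 == pos.getD q 0) ||
         (pos.getD p 0 + (Int.ofNat q - Int.ofNat p) == pos.getD q 0) then c + 1 else c) c) 0

-- one pass over the board: queen columns (last 1 per row wins) and the queen list
def pvExtract (array : List (List Int)) : List Int × List (Nat × Nat) :=
  (List.range array.length).foldl (fun st i =>
    (List.range (array.getD i []).length).foldl (fun (st : List Int × List (Nat × Nat)) j =>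
      if (array.getD i []).getD j 0 == 1 then (st.1.set i (Int.ofNat j), st.2 ++ [(i, j)])
      else st) st) (List.replicate 8 (0 : Int), [])

def satrancTahtasindaCakismaSayisiniBul_alt (array : List (List Int)) : List (List Int) :=
  let result0 := List.replicate 8 (List.replicate 7 (0 : Int))
  let ex := pvExtract array
  let n := array.length
  let fin := ex.2.foldl (fun (st : List Int × List (List Int)) iq =>
    let i := iq.1; let j := iq.2
    let st2 := (List.range j ++ List.range' (j+1) (n - (j+1))).foldl
      (fun (st : List Int × List (List Int)) t =>
        let pos := st.1.set i (Int.ofNat t)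
        let c := pvPairCount pos
        (pos, st.2.set i ((st.2.getD i []).set (if t < j then t else t - 1) c)))
      st
    (st2.1.set i (Int.ofNat j), st2.2)) (ex.1, result0)
  fin.2

-- ===== PRECONDITION & SPEC =====
-- Pre_ excludes boards on which the Python A raises IndexError (a queen in a row with index ≥ 8 or
-- column ≥ 8, or a board whose shape makes the move loop index past a row's end or past the 7-wide
-- result row), and — a stated narrowing to the 8-queens domain — boards with two or more 1-cells in
-- one row, where A's in-place copy mutation silently erases every queen right of the leftmost one.
def Pre_satrancTahtasindaCakismaSayisiniBul (array : List (List Int)) : Prop :=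
  ∀ i ∈ List.range array.length,
    (∀ j₁ ∈ List.range (array.getD i []).length, ∀ j₂ ∈ List.range (array.getD i []).length,
      (array.getD i []).getD j₁ 0 = 1 → (array.getD i []).getD j₂ 0 = 1 → j₁ = j₂) ∧
    (∀ j ∈ List.range (array.getD i []).length, (array.getD i []).getD j 0 = 1 →
      i < 8 ∧ j < 8 ∧ (array.length ≤ j + 1 ∨
        (array.length ≤ (array.getD i []).length ∧ array.length ≤ 8)))

instance (array : List (List Int)) : Decidable (Pre_satrancTahtasindaCakismaSayisiniBul array) := by
  unfold Pre_satrancTahtasindaCakismaSayisiniBul; infer_instance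

def pvWitness_satrancTahtasindaCakismaSayisiniBul : List (List Int) := [[0, 1], [1, 0]]

def Spec_satrancTahtasindaCakismaSayisiniBul (array : List (List Int)) (out : List (List Int)) : Prop :=
  out = satrancTahtasindaCakismaSayisiniBul_alt array
instance (array : List (List Int)) (out : List (List Int)) : Decidable (Spec_satrancTahtasindaCakismaSayisiniBul array out) := by
  unfold Spec_satrancTahtasindaCakismaSayisiniBul; infer_instance

-- ===== CLAIM (what is proved, stated in full; the proofs are below) =====
def Claim_equal_satrancTahtasindaCakismaSayisiniBul : Prop := ∀ (array : List (List Int)), Dom_satrancTahtasindaCakismaSayisiniBul array → Pre_satrancTahtasindaCakismaSayisiniBul array → Spec_satrancTahtasindaCakismaSayisiniBul array (satrancTahtasindaCakismaSayisiniBul array)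

-- ===== LEMMAS AND PROOFS =====

-- `row` has its only 1 at index t
def pvHit (row : List Int) (t : Nat) : Prop :=
  t < row.length ∧ ∀ j, j < row.length → (row.getD j 0 = 1 ↔ j = t)

-- `row` has at most one 1
def pvUni (row : List Int) : Prop :=
  ∀ j₁ j₂, j₁ < row.length → j₂ < row.length → row.getD j₁ 0 = 1 → row.getD j₂ 0 = 1 → j₁ = j₂

-- the board g agrees with `array` in shape and in the (· = 1) mask, except possibly row i,
-- which is queenless in g and has the original length
def pvTrialInv (array : List (List Int)) (i : Nat) (g : List (List Int)) : Prop :=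
  g.length = array.length ∧
  (∀ r, r ≠ i → (g.getD r []).length = (array.getD r []).length ∧
    ∀ j, (g.getD r []).getD j 0 = 1 ↔ (array.getD r []).getD j 0 = 1) ∧
  (g.getD i []).length = (array.getD i []).length ∧
  (∀ j, (g.getD i []).getD j 0 ≠ 1)

theorem pv_getD_set_self (l : List Int) (i : Nat) (a d : Int) (h : i < l.length) :
    (l.set i a).getD i d = a := by
  simp [List.getD, h]

theorem pv_getD_set_ne (l : List Int) (i r : Nat) (a d : Int) (h : i ≠ r) :
    (l.set i a).getD r d = l.getD r d := by
  simp [List.getD, List.getElem?_set_ne h]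

theorem pvSet2_getD_ne (g : List (List Int)) (i j : Nat) (v : Int) (r : Nat) (h : i ≠ r) :
    ((pvSet2 g i j v).getD r []) = g.getD r [] := by
  unfold pvSet2
  simp [List.getD, List.getElem?_set_ne h]

theorem pvSet2_getD_self (g : List (List Int)) (i j : Nat) (v : Int) (h : i < g.length) :
    ((pvSet2 g i j v).getD i []) = (g.getD i []).set j v := by
  unfold pvSet2
  simp [List.getD, h]

theorem pvSet2_length (g : List (List Int)) (i j : Nat) (v : Int) :
    (pvSet2 g i j v).length = g.length := by
  simp [pvSet2]

theorem pvRowStep_congr (kl : List Int) (i : Nat) (row row' : List Int)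
    (hl : row.length = row'.length)
    (hm : ∀ j, j < row.length → (row.getD j 0 = 1 ↔ row'.getD j 0 = 1)) :
    pvRowStep kl i row = pvRowStep kl i row' := by
  unfold pvRowStep
  rw [hl]
  refine PySem.List.foldl_congr_mem _ _ _ _ ?_
  intro acc x hx
  have hx' : x < row.length := by rw [hl]; exact List.mem_range.mp hx
  have hg : (row.getD x 0 == 1) = (row'.getD x 0 == 1) := by
    have h2 := hm x hx'
    show decide (row.getD x 0 = 1) = decide (row'.getD x 0 = 1)
    exact decide_eq_decide.mpr h2
  rw [hg]

theorem pvRowStep_noop (kl : List Int) (i : Nat) (row : List Int)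
    (h : ∀ j, j < row.length → row.getD j 0 ≠ 1) :
    pvRowStep kl i row = kl := by
  unfold pvRowStep
  rw [PySem.List.foldl_congr_mem _ _ (fun kl2 _ => kl2) _ ?_]
  · exact List.foldl_fixed _
  · intro acc x hx
    have hx' : x < row.length := List.mem_range.mp hx
    have hv := h x hx'
    simp only [List.getD] at hv
    simp [hv]

theorem pvRowStep_hit (kl : List Int) (i : Nat) (row : List Int) (t : Nat)
    (h : pvHit row t) : pvRowStep kl i row = kl.set i (Int.ofNat t) := by
  obtain ⟨ht, hall⟩ := h
  have key : ∀ m, m ≤ row.length →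
      (List.range m).foldl (fun kl2 j => if row.getD j 0 == 1 then kl2.set i (Int.ofNat j) else kl2) kl
      = if t < m then kl.set i (Int.ofNat t) else kl := by
    intro m
    induction m with
    | zero => intro _; simp
    | succ m ih =>
      intro hm
      have hm' : m ≤ row.length := Nat.le_of_succ_le hm
      rw [List.range_succ, List.foldl_append, ih hm']
      by_cases hc : m = t
      · subst hc
        have hv : row.getD m 0 = 1 := (hall m (Nat.lt_of_succ_le hm)).mpr rfl
        simp only [List.getD] at hv
        simp [hv]
      · have hv : ¬ row.getD m 0 = 1 := fun h1 => hc ((hall m (Nat.lt_of_succ_le hm)).mp h1)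
        simp only [List.getD] at hv
        by_cases ho : t < m
        · simp [hv, ho, Nat.lt_succ_of_lt ho]
        · have ho2 : ¬ t < m + 1 := by omega
          simp [hv, ho, ho2]
  unfold pvRowStep
  rw [key row.length (Nat.le_refl _)]
  simp [ht]

theorem pvRowStep_set_comm (kl : List Int) (i r : Nat) (x : Int) (row : List Int)
    (h : r ≠ i) : pvRowStep (kl.set i x) r row = (pvRowStep kl r row).set i x := by
  unfold pvRowStep
  induction (List.range row.length) generalizing kl with
  | nil => rfl
  | cons a l ih =>
    simp only [List.foldl_cons]
    by_cases hc : row.getD a 0 == 1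
    · rw [if_pos hc, if_pos hc, List.set_comm x (Int.ofNat a) (Ne.symm h), ih]
    · rw [if_neg hc, if_neg hc, ih]

theorem pvRowStep_set_absorb (kl : List Int) (i : Nat) (row : List Int) (x : Int)
    (h : pvUni row) : (pvRowStep kl i row).set i x = kl.set i x := by
  by_cases hex : ∃ j, j < row.length ∧ row.getD j 0 = 1
  · obtain ⟨j0, hj0, hv⟩ := hex
    have hhit : pvHit row j0 :=
      ⟨hj0, fun j hj => ⟨fun h1 => h j j0 hj hj0 h1 hv, fun h1 => h1 ▸ hv⟩⟩
    rw [pvRowStep_hit kl i row j0 hhit, List.set_set]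
  · have hnone : ∀ j, j < row.length → row.getD j 0 ≠ 1 := fun j hj hv => hex ⟨j, hj, hv⟩
    rw [pvRowStep_noop kl i row hnone]

theorem pvRowStep_length (kl : List Int) (i : Nat) (row : List Int) :
    (pvRowStep kl i row).length = kl.length := by
  unfold pvRowStep
  induction (List.range row.length) generalizing kl with
  | nil => rfl
  | cons a l ih =>
    simp only [List.foldl_cons]
    by_cases hc : row.getD a 0 == 1
    · rw [if_pos hc, ih]; simp
    · rw [if_neg hc, ih]

theorem pv_foldl_fst {α σ τ : Type} (l : List α) (f : σ × τ → α → σ × τ) (g : σ → α → σ)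
    (h : ∀ s x, (f s x).1 = g s.1 x) : ∀ s : σ × τ, (l.foldl f s).1 = l.foldl g s.1 := by
  induction l with
  | nil => intro s; rfl
  | cons a l ih => intro s; rw [List.foldl_cons, List.foldl_cons, ih, h]

-- the structural key: a board that is mask-equal to `array` away from row i and whose row i has
-- its only 1 at t extracts to `array`'s konum with entry i overwritten by t
theorem pvKonum_trial (array : List (List Int)) (i : Nat) (g : List (List Int))
    (hlen : g.length = array.length)
    (hrows : ∀ r, r ≠ i → (g.getD r []).length = (array.getD r []).length ∧
      ∀ j, (g.getD r []).getD j 0 = 1 ↔ (array.getD r []).getD j 0 = 1)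
    (hi : i < array.length) (t : Nat) (hhit : pvHit (g.getD i []) t)
    (huni : pvUni (array.getD i [])) :
    pvKonum g = (pvKonum array).set i (Int.ofNat t) := by
  unfold pvKonum
  rw [hlen]
  have key : ∀ m, m ≤ array.length →
      (List.range m).foldl (fun kl r => pvRowStep kl r (g.getD r [])) (List.replicate 8 (0 : Int))
      = if i < m then
          ((List.range m).foldl (fun kl r => pvRowStep kl r (array.getD r [])) (List.replicate 8 (0 : Int))).set i (Int.ofNat t)
        else
          (List.range m).foldl (fun kl r => pvRowStep kl r (array.getD r [])) (List.replicate 8 (0 : Int)) := by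
    intro m
    induction m with
    | zero => simp
    | succ m ih =>
      intro hm
      have hm' : m ≤ array.length := Nat.le_of_succ_le hm
      simp only [List.range_succ, List.foldl_append, List.foldl_cons, List.foldl_nil]
      rw [ih hm']
      rcases Nat.lt_trichotomy m i with hc | hc | hc
      · rw [if_neg (by omega), if_neg (by omega)]
        exact pvRowStep_congr _ m _ _ (hrows m (by omega)).1 (fun j _ => (hrows m (by omega)).2 j)
      · subst hc
        rw [if_neg (by omega), if_pos (by omega)]
        rw [pvRowStep_hit _ _ _ t hhit, pvRowStep_set_absorb _ _ _ _ huni]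
      · rw [if_pos (by omega), if_pos (by omega)]
        rw [pvRowStep_set_comm _ _ _ _ _ (by omega)]
        rw [pvRowStep_congr _ m _ _ (hrows m (by omega)).1 (fun j _ => (hrows m (by omega)).2 j)]
  rw [key array.length (Nat.le_refl _), if_pos hi]

theorem pvKonum_length (g : List (List Int)) : (pvKonum g).length = 8 := by
  unfold pvKonum
  have key : ∀ (l : List Nat) (kl : List Int),
      (l.foldl (fun kl i => pvRowStep kl i (g.getD i [])) kl).length = kl.length := by
    intro l
    induction l with
    | nil => intro kl; rfl
    | cons a l ih => intro kl; rw [List.foldl_cons, ih, pvRowStep_length]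
  rw [key]; simp

-- `(pvExtract array).1` is exactly the konum extraction of cakismaSayisi
theorem pvExtract_fst (array : List (List Int)) : (pvExtract array).1 = pvKonum array := by
  unfold pvExtract pvKonum
  refine pv_foldl_fst _ _ _ ?_ _
  intro s i
  show (_ : List Int × List (Nat × Nat)).1 = pvRowStep s.1 i (array.getD i [])
  unfold pvRowStep
  refine pv_foldl_fst _ _ _ ?_ _
  intro s' j
  by_cases hc : (array.getD i []).getD j 0 == 1
  · rw [if_pos hc, if_pos hc]
  · rw [if_neg hc, if_neg hc]

-- the while/pop(0) pair loop of A and the double range loop of B count the same pairs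
theorem pv_fold_linear (P : Nat → Bool) (l : List Nat) (c : Int) :
    l.foldl (fun c j => if P j then c + 1 else c) c
      = c + (l.map (fun j => if P j then (1:Int) else 0)).sum := by
  rw [PySem.List.foldl_congr_mem l _ (fun c j => c + if P j then (1:Int) else 0) c ?_]
  · exact PySem.List.foldl_add _ _ _
  · intro acc x _
    by_cases h : P x
    · simp [h]
    · simp [h]

set_option maxHeartbeats 2000000 in
theorem pvCakWhile_eq_pairCount (l : List Int) (h : l.length = 8) :
    pvCakWhile l 0 = pvPairCount l := by
  match l with
  | [a0,a1,a2,a3,a4,a5,a6,a7] =>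
    simp only [pvCakWhile, pvCountHead, pvPairCount, pv_fold_linear]
    norm_num [List.range_succ, List.range']


-- ---- named forms of the two ports' loop bodies (definitionally equal to the ports) ----

def pvCak0 : List (List Int) := List.replicate 8 (List.replicate 7 (0 : Int))

def aTrial (i : Nat) (sl : Nat → Nat) (st : List (List Int) × List (List Int)) (t : Nat) :
    List (List Int) × List (List Int) :=
  (pvSet2 (pvSet2 st.1 i t 1) i t 0,
   st.2.set i ((st.2.getD i []).set (sl t) (cakismaSayisi (pvSet2 st.1 i t 1))))

def aCell (array : List (List Int)) (i : Nat) (st : List (List Int) × List (List Int)) (j : Nat) :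
    List (List Int) × List (List Int) :=
  if (st.1.getD i []).getD j 0 == 1 then
    let st2 := (List.range j).foldl (aTrial i (fun t => t)) (pvSet2 st.1 i j 0, st.2)
    let st3 := (List.range' (j+1) (array.length - (j+1))).foldl (aTrial i (fun t => t - 1)) st2
    (pvSet2 st3.1 i j 1, st3.2)
  else st

def aRow (array : List (List Int)) (st : List (List Int) × List (List Int)) (i : Nat) :
    List (List Int) × List (List Int) :=
  (List.range ((st.1.getD i []).length)).foldl (aCell array i) st

theorem aDef (array : List (List Int)) :
    satrancTahtasindaCakismaSayisiniBul array
      = ((List.range array.length).foldl (aRow array) (array, pvCak0)).2 := rfl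

def bTrialS (i : Nat) (sl : Nat → Nat) (st : List Int × List (List Int)) (t : Nat) :
    List Int × List (List Int) :=
  (st.1.set i (Int.ofNat t),
   st.2.set i ((st.2.getD i []).set (sl t) (pvPairCount (st.1.set i (Int.ofNat t)))))

def bQueen (n : Nat) (st : List Int × List (List Int)) (iq : Nat × Nat) :
    List Int × List (List Int) :=
  let st2 := (List.range iq.2 ++ List.range' (iq.2+1) (n - (iq.2+1))).foldl
    (bTrialS iq.1 (fun t => if t < iq.2 then t else t - 1)) st
  (st2.1.set iq.1 (Int.ofNat iq.2), st2.2)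

theorem bDef (array : List (List Int)) :
    satrancTahtasindaCakismaSayisiniBul_alt array
      = ((pvExtract array).2.foldl (bQueen array.length) ((pvExtract array).1, pvCak0)).2 := rfl

def exStep (array : List (List Int)) (st : List Int × List (Nat × Nat)) (i : Nat) :
    List Int × List (Nat × Nat) :=
  (List.range (array.getD i []).length).foldl (fun st j =>
    if (array.getD i []).getD j 0 == 1 then (st.1.set i (Int.ofNat j), st.2 ++ [(i, j)])
    else st) st

theorem exDef (array : List (List Int)) :
    pvExtract array = (List.range array.length).foldl (exStep array) (List.replicate 8 (0 : Int), []) := rfl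

-- the board state A carries agrees with the input in shape and in the (· = 1) mask
def pvGEq (array g : List (List Int)) : Prop :=
  g.length = array.length ∧ ∀ s : Nat, (g.getD s []).length = (array.getD s []).length ∧
    ∀ j : Nat, ((g.getD s []).getD j 0 = 1 ↔ (array.getD s []).getD j 0 = 1)

-- ---- extraction-step characterization ----

theorem exStep_noop (array : List (List Int)) (st : List Int × List (Nat × Nat)) (i : Nat)
    (h : ∀ j, j < (array.getD i []).length → (array.getD i []).getD j 0 ≠ 1) :
    exStep array st i = st := by
  unfold exStep
  rw [PySem.List.foldl_congr_mem _ _ (fun st _ => st) _ ?_]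
  · exact List.foldl_fixed _
  · intro acc x hx
    have hv := h x (List.mem_range.mp hx)
    simp only [List.getD] at hv
    simp [hv]

theorem exStep_hit (array : List (List Int)) (st : List Int × List (Nat × Nat)) (i t : Nat)
    (h : pvHit (array.getD i []) t) :
    exStep array st i = (st.1.set i (Int.ofNat t), st.2 ++ [(i, t)]) := by
  obtain ⟨ht, hall⟩ := h
  have key : ∀ m, m ≤ (array.getD i []).length →
      (List.range m).foldl (fun st j =>
        if (array.getD i []).getD j 0 == 1 then (st.1.set i (Int.ofNat j), st.2 ++ [(i, j)])
        else st) st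
      = if t < m then (st.1.set i (Int.ofNat t), st.2 ++ [(i, t)]) else st := by
    intro m
    induction m with
    | zero => intro _; simp
    | succ m ih =>
      intro hm
      have hm' : m ≤ (array.getD i []).length := Nat.le_of_succ_le hm
      rw [List.range_succ, List.foldl_append, ih hm']
      by_cases hc : m = t
      · subst hc
        have hv : (array.getD i []).getD m 0 = 1 := (hall m (Nat.lt_of_succ_le hm)).mpr rfl
        simp only [List.getD] at hv
        simp [hv]
      · have hv : ¬ (array.getD i []).getD m 0 = 1 :=
          fun h1 => hc ((hall m (Nat.lt_of_succ_le hm)).mp h1)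
        simp only [List.getD] at hv
        by_cases ho : t < m
        · simp [hv, ho, Nat.lt_succ_of_lt ho]
        · have ho2 : ¬ t < m + 1 := by omega
          simp [hv, ho, ho2]
  unfold exStep
  rw [key (array.getD i []).length (Nat.le_refl _), if_pos ht]

-- ---- trial-phase simulation ----

theorem trial_val (array : List (List Int)) (r : Nat) (hr : r < array.length)
    (huni : pvUni (array.getD r [])) (gA : List (List Int)) (hInv : pvTrialInv array r gA)
    (t : Nat) (ht : t < (array.getD r []).length) :
    cakismaSayisi (pvSet2 gA r t 1) = pvPairCount ((pvKonum array).set r (Int.ofNat t)) := by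
  obtain ⟨hlen, hrows, hlenr, hqless⟩ := hInv
  have hrg : r < gA.length := by omega
  have hrow : (pvSet2 gA r t 1).getD r [] = (gA.getD r []).set t 1 := pvSet2_getD_self _ _ _ _ hrg
  have hhit : pvHit ((pvSet2 gA r t 1).getD r []) t := by
    rw [hrow]
    constructor
    · rw [List.length_set, hlenr]; exact ht
    · intro j hj
      by_cases hc : j = t
      · subst hc
        rw [pv_getD_set_self _ _ _ _ (by rw [hlenr]; exact ht)]
        simp
      · rw [pv_getD_set_ne _ _ _ _ _ (fun h => hc h.symm)]
        constructor
        · intro h1; exact absurd h1 (hqless j)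
        · intro h1; exact absurd h1 hc
  have hk : pvKonum (pvSet2 gA r t 1) = (pvKonum array).set r (Int.ofNat t) := by
    refine pvKonum_trial array r _ (by rw [pvSet2_length]; exact hlen) ?_ hr t hhit huni
    intro s hs
    rw [pvSet2_getD_ne _ _ _ _ _ (fun h => hs h.symm)]
    exact hrows s hs
  unfold cakismaSayisi
  rw [hk]
  exact pvCakWhile_eq_pairCount _ (by rw [List.length_set, pvKonum_length])

theorem trial_inv_step (array : List (List Int)) (r : Nat) (hr : r < array.length)
    (gA : List (List Int)) (hInv : pvTrialInv array r gA)
    (t : Nat) (ht : t < (array.getD r []).length) :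
    pvTrialInv array r (pvSet2 (pvSet2 gA r t 1) r t 0) := by
  obtain ⟨hlen, hrows, hlenr, hqless⟩ := hInv
  have hrg : r < gA.length := by omega
  have hrg2 : r < (pvSet2 gA r t 1).length := by rw [pvSet2_length]; omega
  refine ⟨by rw [pvSet2_length, pvSet2_length]; exact hlen, ?_, ?_, ?_⟩
  · intro s hs
    rw [pvSet2_getD_ne _ _ _ _ _ (fun h => hs h.symm),
        pvSet2_getD_ne _ _ _ _ _ (fun h => hs h.symm)]
    exact hrows s hs
  · rw [pvSet2_getD_self _ _ _ _ hrg2, pvSet2_getD_self _ _ _ _ hrg]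
    rw [List.set_set]
    simpa using hlenr
  · intro j
    rw [pvSet2_getD_self _ _ _ _ hrg2, pvSet2_getD_self _ _ _ _ hrg, List.set_set]
    by_cases hc : j = t
    · subst hc
      rw [pv_getD_set_self _ _ _ _ (by rw [hlenr]; exact ht)]
      omega
    · rw [pv_getD_set_ne _ _ _ _ _ (fun h => hc h.symm)]
      exact hqless j

theorem trial_T (array : List (List Int)) (r : Nat) (hr : r < array.length)
    (huni : pvUni (array.getD r [])) (sl : Nat → Nat) :
    ∀ (ts : List Nat), (∀ t ∈ ts, t < (array.getD r []).length) →
    ∀ (gA : List (List Int)) (posB : List Int) (cak : List (List Int)),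
      pvTrialInv array r gA → (∃ y, posB = (pvKonum array).set r y) →
      (ts.foldl (aTrial r sl) (gA, cak)).2 = (ts.foldl (bTrialS r sl) (posB, cak)).2 ∧
      pvTrialInv array r (ts.foldl (aTrial r sl) (gA, cak)).1 ∧
      (∃ y, (ts.foldl (bTrialS r sl) (posB, cak)).1 = (pvKonum array).set r y) := by
  intro ts
  induction ts with
  | nil =>
    intro _ gA posB cak hInv hpos
    exact ⟨rfl, hInv, hpos⟩
  | cons t ts ih =>
    intro hts gA posB cak hInv hpos
    obtain ⟨y, hy⟩ := hpos
    have ht : t < (array.getD r []).length := hts t (List.mem_cons_self)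
    have hvals : cakismaSayisi (pvSet2 gA r t 1) = pvPairCount (posB.set r (Int.ofNat t)) := by
      rw [hy, List.set_set]
      exact trial_val array r hr huni gA hInv t ht
    simp only [List.foldl_cons]
    have hstep : aTrial r sl (gA, cak) t
        = (pvSet2 (pvSet2 gA r t 1) r t 0,
           cak.set r ((cak.getD r []).set (sl t) (pvPairCount (posB.set r (Int.ofNat t))))) := by
      unfold aTrial
      rw [hvals]
    rw [hstep]
    show _ ∧ _ ∧ _
    have hb : bTrialS r sl (posB, cak) t
        = (posB.set r (Int.ofNat t),
           cak.set r ((cak.getD r []).set (sl t) (pvPairCount (posB.set r (Int.ofNat t))))) := rfl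
    rw [hb]
    exact ih (fun u hu => hts u (List.mem_cons_of_mem _ hu)) _ _ _
      (trial_inv_step array r hr gA hInv t ht)
      ⟨Int.ofNat t, by rw [hy, List.set_set]⟩

-- ---- one row of A against one queen of B ----

theorem row_sim (array : List (List Int)) (r j : Nat) (hr : r < array.length)
    (huni : pvUni (array.getD r [])) (hhit : pvHit (array.getD r []) j)
    (hdisj : array.length ≤ j + 1 ∨ array.length ≤ (array.getD r []).length)
    (g cak : List (List Int)) (hG : pvGEq array g) :
    pvGEq array (aRow array (g, cak) r).1 ∧
    (aRow array (g, cak) r).2 = (bQueen array.length (pvKonum array, cak) (r, j)).2 ∧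
    (bQueen array.length (pvKonum array, cak) (r, j)).1 = pvKonum array := by
  obtain ⟨hlen, hrows⟩ := hG
  have hrg : r < g.length := by omega
  have hLr : (g.getD r []).length = (array.getD r []).length := (hrows r).1
  have hself : pvKonum array = (pvKonum array).set r (Int.ofNat j) :=
    pvKonum_trial array r array rfl (fun _ _ => ⟨rfl, fun _ => Iff.rfl⟩) hr j hhit huni
  -- the trial boards: row r emptied
  have hInv0 : pvTrialInv array r (pvSet2 g r j 0) := by
    refine ⟨by rw [pvSet2_length]; exact hlen, ?_, ?_, ?_⟩
    · intro s hs
      rw [pvSet2_getD_ne _ _ _ _ _ (fun h => hs h.symm)]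
      exact ⟨(hrows s).1, (hrows s).2⟩
    · rw [pvSet2_getD_self _ _ _ _ hrg]; simpa using hLr
    · intro j'
      rw [pvSet2_getD_self _ _ _ _ hrg]
      by_cases hc : j' = j
      · rw [hc]
        rw [pv_getD_set_self _ _ _ _ (by rw [hLr]; exact hhit.1)]
        omega
      · rw [pv_getD_set_ne _ _ _ _ _ (fun h => hc h.symm)]
        intro h1
        by_cases hb : j' < (array.getD r []).length
        · exact hc ((hhit.2 j' hb).mp (((hrows r).2 j').mp h1))
        · have h0 : (g.getD r []).getD j' 0 = 0 := List.getD_eq_default _ _ (by omega)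
          rw [h0] at h1
          exact absurd h1 (by norm_num)
  -- k-phase trials
  have hkT := trial_T array r hr huni (fun t => t) (List.range j)
    (fun t htm => lt_of_lt_of_le (List.mem_range.mp htm) (le_of_lt hhit.1))
    (pvSet2 g r j 0) (pvKonum array) cak hInv0 ⟨Int.ofNat j, hself⟩
  obtain ⟨hk2, hkInv, hkpos⟩ := hkT
  -- m-phase trials
  have hmb : ∀ t ∈ List.range' (j+1) (array.length - (j+1)), t < (array.getD r []).length := by
    intro t htm
    have := List.mem_range'_1.mp htm
    rcases hdisj with hd | hd
    · omega
    · omega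
  have hmT := trial_T array r hr huni (fun t => t - 1) (List.range' (j+1) (array.length - (j+1))) hmb
    ((List.range j).foldl (aTrial r (fun t => t)) (pvSet2 g r j 0, cak)).1
    ((List.range j).foldl (bTrialS r (fun t => t)) (pvKonum array, cak)).1
    ((List.range j).foldl (aTrial r (fun t => t)) (pvSet2 g r j 0, cak)).2
    hkInv hkpos
  obtain ⟨hm2, hmInv, hmpos⟩ := hmT
  set akS := (List.range j).foldl (aTrial r (fun t => t)) (pvSet2 g r j 0, cak) with hakS
  set amS := (List.range' (j+1) (array.length - (j+1))).foldl (aTrial r (fun t => t - 1)) akS with hamS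
  set FB := (pvSet2 amS.1 r j 1, amS.2) with hFB
  have hamLen : amS.1.length = array.length := hmInv.1
  have hamLenR : (amS.1.getD r []).length = (array.getD r []).length := hmInv.2.2.1
  have hFBrow : FB.1.getD r [] = (amS.1.getD r []).set j 1 :=
    pvSet2_getD_self _ _ _ _ (by omega)
  -- A's row loop: nothing happens before j, the block fires at j, nothing after
  have hcell : aCell array r (g, cak) j = FB := by
    have harr : (((g, cak).1.getD r []).getD j 0 == 1) = true :=
      beq_iff_eq.mpr (((hrows r).2 j).mpr ((hhit.2 j hhit.1).mpr rfl))
    unfold aCell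
    rw [if_pos harr]
  have hA : aRow array (g, cak) r = FB := by
    have key : ∀ m, m ≤ (g.getD r []).length →
        (List.range m).foldl (aCell array r) (g, cak) = if j < m then FB else (g, cak) := by
      intro m
      induction m with
      | zero => intro _; simp
      | succ m ih =>
        intro hm
        have hm' : m ≤ (g.getD r []).length := Nat.le_of_succ_le hm
        rw [List.range_succ, List.foldl_append, ih hm']
        rcases Nat.lt_trichotomy m j with hc | hc | hc
        · rw [if_neg (by omega), if_neg (by omega)]
          show aCell array r (g, cak) m = (g, cak)
          have harr : ¬ (array.getD r []).getD m 0 = 1 := by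
            intro h1
            have := (hhit.2 m (by omega)).mp h1
            omega
          have hneg : ¬ (((g, cak).1.getD r []).getD m 0 == 1) = true := by
            intro h1
            exact harr (((hrows r).2 m).mp (beq_iff_eq.mp h1))
          unfold aCell
          rw [if_neg hneg]
        · subst hc
          rw [if_neg (by omega), if_pos (by omega)]
          exact hcell
        · rw [if_pos (by omega), if_pos (by omega)]
          show aCell array r FB m = FB
          have hneg : ¬ ((FB.1.getD r []).getD m 0 == 1) = true := by
            intro h1
            have h2 := beq_iff_eq.mp h1
            rw [hFBrow, pv_getD_set_ne _ _ _ _ _ (by omega)] at h2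
            exact hmInv.2.2.2 m h2
          unfold aCell
          rw [if_neg hneg]
    unfold aRow
    rw [key ((g, cak).1.getD r []).length (Nat.le_refl _), if_pos (by rw [hLr]; exact hhit.1)]
  -- B's trial fold over the concatenation, converted phase by phase
  have hbk : (List.range j).foldl (bTrialS r (fun t => if t < j then t else t - 1)) (pvKonum array, cak)
      = (List.range j).foldl (bTrialS r (fun t => t)) (pvKonum array, cak) := by
    refine PySem.List.foldl_congr_mem _ _ _ _ ?_
    intro acc t htm
    have h := List.mem_range.mp htm
    simp [bTrialS, h]
  have hbm : ∀ (st : List Int × List (List Int)),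
      (List.range' (j+1) (array.length - (j+1))).foldl
        (bTrialS r (fun t => if t < j then t else t - 1)) st
      = (List.range' (j+1) (array.length - (j+1))).foldl (bTrialS r (fun t => t - 1)) st := by
    intro st
    refine PySem.List.foldl_congr_mem _ _ _ _ ?_
    intro acc t htm
    have h := List.mem_range'_1.mp htm
    have h2 : ¬ t < j := by omega
    simp [bTrialS, h2]
  set bkS := (List.range j).foldl (bTrialS r (fun t => t)) (pvKonum array, cak) with hbkS
  have heta : (bkS.1, akS.2) = bkS := by rw [hk2]
  have hbFull : bQueen array.length (pvKonum array, cak) (r, j)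
      = (((List.range' (j+1) (array.length - (j+1))).foldl (bTrialS r (fun t => t - 1)) bkS).1.set r (Int.ofNat j),
         ((List.range' (j+1) (array.length - (j+1))).foldl (bTrialS r (fun t => t - 1)) bkS).2) := by
    unfold bQueen
    rw [List.foldl_append, hbk, hbm]
  refine ⟨?_, ?_, ?_⟩
  · rw [hA]
    refine ⟨by rw [hFB]; rw [pvSet2_length]; exact hamLen, ?_⟩
    intro s
    by_cases hs : s = r
    · subst hs
      refine ⟨by rw [hFBrow]; simpa using hamLenR, ?_⟩
      intro j'
      rw [hFBrow]
      by_cases hc : j' = j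
      · rw [hc]
        rw [pv_getD_set_self _ _ _ _ (by rw [hamLenR]; exact hhit.1)]
        have hv := (hhit.2 j hhit.1).mpr rfl
        simp only [List.getD] at hv
        simp [hv]
      · rw [pv_getD_set_ne _ _ _ _ _ (fun h => hc h.symm)]
        constructor
        · intro h1; exact absurd h1 (hmInv.2.2.2 j')
        · intro h1
          by_cases hb : j' < (array.getD s []).length
          · exact absurd ((hhit.2 j' hb).mp h1) hc
          · rw [List.getD_eq_default _ _ (by omega)] at h1
            exact absurd h1 (by norm_num)
    · have hrowe : FB.1.getD s [] = amS.1.getD s [] := pvSet2_getD_ne _ _ _ _ _ (fun h => hs h.symm)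
      rw [hrowe]
      exact ⟨(hmInv.2.1 s hs).1, (hmInv.2.1 s hs).2⟩
  · rw [hA, hbFull]
    show amS.2 = _
    rw [hm2, heta]
  · rw [hbFull]
    obtain ⟨y, hy⟩ := hmpos
    rw [heta] at hy
    rw [hy, List.set_set, ← hself]

theorem aRow_noop (array : List (List Int)) (r : Nat) (g cak : List (List Int))
    (hG : pvGEq array g)
    (hnone : ∀ j, j < (array.getD r []).length → (array.getD r []).getD j 0 ≠ 1) :
    aRow array (g, cak) r = (g, cak) := by
  unfold aRow
  have hLr : ((g, cak).1.getD r []).length = (array.getD r []).length := (hG.2 r).1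
  have key : ∀ l : List Nat, (∀ x ∈ l, x < (array.getD r []).length) →
      l.foldl (aCell array r) (g, cak) = (g, cak) := by
    intro l
    induction l with
    | nil => intro _; rfl
    | cons a l ih =>
      intro h
      rw [List.foldl_cons]
      have hneg : ¬ (((g, cak).1.getD r []).getD a 0 == 1) = true := by
        intro h1
        exact hnone a (h a List.mem_cons_self) (((hG.2 r).2 a).mp (beq_iff_eq.mp h1))
      have hid : aCell array r (g, cak) a = (g, cak) := by
        unfold aCell; rw [if_neg hneg]
      rw [hid]
      exact ih (fun x hx => h x (List.mem_cons_of_mem _ hx))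
  refine key _ ?_
  intro x hx
  have h1 := List.mem_range.mp hx
  omega

theorem main_sim (array : List (List Int)) (hpre : Pre_satrancTahtasindaCakismaSayisiniBul array) :
    ∀ r, r ≤ array.length →
      pvGEq array (((List.range r).foldl (aRow array) (array, pvCak0)).1) ∧
      (((List.range r).foldl (aRow array) (array, pvCak0)).2
        = ((((List.range r).foldl (exStep array) (List.replicate 8 (0:Int), [])).2).foldl
            (bQueen array.length) (pvKonum array, pvCak0)).2) ∧
      ((((List.range r).foldl (exStep array) (List.replicate 8 (0:Int), [])).2).foldl
            (bQueen array.length) (pvKonum array, pvCak0)).1 = pvKonum array := by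
  intro r
  induction r with
  | zero => intro _; exact ⟨⟨rfl, fun s => ⟨rfl, fun j => Iff.rfl⟩⟩, rfl, rfl⟩
  | succ r ih =>
    intro hr
    have hr' : r ≤ array.length := Nat.le_of_succ_le hr
    obtain ⟨hG, h2, h3⟩ := ih hr'
    have hrlt : r < array.length := Nat.lt_of_succ_le hr
    have hp := hpre r (List.mem_range.mpr hrlt)
    have huni : pvUni (array.getD r []) := fun j1 j2 hj1 hj2 e1 e2 =>
      hp.1 j1 (List.mem_range.mpr hj1) j2 (List.mem_range.mpr hj2) e1 e2
    by_cases hex : ∃ jj, jj < (array.getD r []).length ∧ (array.getD r []).getD jj 0 = 1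
    · obtain ⟨j0, hj0, hv0⟩ := hex
      have hhit : pvHit (array.getD r []) j0 :=
        ⟨hj0, fun j hj => ⟨fun h1 => huni j j0 hj hj0 h1 hv0, fun h1 => h1 ▸ hv0⟩⟩
      have hfacts := hp.2 j0 (List.mem_range.mpr hj0) hv0
      have hdisj : array.length ≤ j0 + 1 ∨ array.length ≤ (array.getD r []).length := by
        rcases hfacts.2.2 with h | h
        · exact Or.inl h
        · exact Or.inr h.1
      have hq : ((List.range (r+1)).foldl (exStep array) (List.replicate 8 (0:Int), [])).2
          = (((List.range r).foldl (exStep array) (List.replicate 8 (0:Int), [])).2) ++ [(r, j0)] := by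
        rw [List.range_succ, List.foldl_append, List.foldl_cons, List.foldl_nil,
            exStep_hit array _ r j0 hhit]
      have hstA : ((List.range (r+1)).foldl (aRow array) (array, pvCak0))
          = aRow array ((((List.range r).foldl (aRow array) (array, pvCak0)).1),
                        (((List.range r).foldl (aRow array) (array, pvCak0)).2)) r := by
        rw [List.range_succ, List.foldl_append, List.foldl_cons, List.foldl_nil]
      have hsim := row_sim array r j0 hrlt huni hhit hdisj
        (((List.range r).foldl (aRow array) (array, pvCak0)).1)
        (((List.range r).foldl (aRow array) (array, pvCak0)).2) hG
      have hBs : ((((List.range (r+1)).foldl (exStep array) (List.replicate 8 (0:Int), [])).2).foldl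
            (bQueen array.length) (pvKonum array, pvCak0))
          = bQueen array.length (pvKonum array,
              (((List.range r).foldl (aRow array) (array, pvCak0)).2)) (r, j0) := by
        rw [hq, List.foldl_append, List.foldl_cons, List.foldl_nil]
        congr 1
        have he : ((((List.range r).foldl (exStep array) (List.replicate 8 (0:Int), [])).2).foldl
            (bQueen array.length) (pvKonum array, pvCak0))
            = (((((List.range r).foldl (exStep array) (List.replicate 8 (0:Int), [])).2).foldl
            (bQueen array.length) (pvKonum array, pvCak0)).1,
               ((((List.range r).foldl (exStep array) (List.replicate 8 (0:Int), [])).2).foldl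
            (bQueen array.length) (pvKonum array, pvCak0)).2) := rfl
        rw [he, h3, ← h2]
      refine ⟨?_, ?_, ?_⟩
      · rw [hstA]; exact hsim.1
      · rw [hstA, hBs]; exact hsim.2.1
      · rw [hBs]; exact hsim.2.2
    · have hnone : ∀ j, j < (array.getD r []).length → (array.getD r []).getD j 0 ≠ 1 :=
        fun j hj hv => hex ⟨j, hj, hv⟩
      have hq : ((List.range (r+1)).foldl (exStep array) (List.replicate 8 (0:Int), [])).2
          = (((List.range r).foldl (exStep array) (List.replicate 8 (0:Int), [])).2) := by
        rw [List.range_succ, List.foldl_append, List.foldl_cons, List.foldl_nil,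
            exStep_noop array _ r hnone]
      have hstA : ((List.range (r+1)).foldl (aRow array) (array, pvCak0))
          = ((List.range r).foldl (aRow array) (array, pvCak0)) := by
        rw [List.range_succ, List.foldl_append, List.foldl_cons, List.foldl_nil]
        exact aRow_noop array r _ _ hG hnone
      rw [hq, hstA]
      exact ⟨hG, h2, h3⟩

theorem satrancTahtasindaCakismaSayisiniBul_spec' (array : List (List Int))
    (hpre : Pre_satrancTahtasindaCakismaSayisiniBul array) :
    satrancTahtasindaCakismaSayisiniBul array = satrancTahtasindaCakismaSayisiniBul_alt array := by
  rw [aDef, bDef, pvExtract_fst, exDef]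
  exact (main_sim array hpre array.length (Nat.le_refl _)).2.1

-- ===== VERDICT (by name: the statement is the Claim_ definition above) =====
theorem satrancTahtasindaCakismaSayisiniBul_spec : Claim_equal_satrancTahtasindaCakismaSayisiniBul := by
  intro array _ hpre
  exact satrancTahtasindaCakismaSayisiniBul_spec' array hpre
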